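-- pv_equiv track=rewrite | github.com/dmarnerides/boardom | boardom/board/server/datastore.py | is_subdir
-- ===== SOURCE A (Python) =====
-- def is_subdir(path, paths):
--     path = path + '/'
--     for x in paths:
--         x = x + '/'
--         if x == path:
--             continue
--         if path.startswith(x):
--             return True
--     return False
-- ===== SOURCE B (Python) =====
-- def is_subdir(path, paths):
--     s = {p + '/' for p in paths}
--     q = path + '/'
--     for i, c in enumerate(q):
--         if c == '/':
--             pre = q[:i + 1]
--             if pre != q and pre in s:
--                 return True
--     return False
-- ===== Notes on version B (the rewrite author's own statement) =====
-- stated objective: alternative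
-- what changed: Replaces the linear startswith-scan over paths with a set of normalized paths built once, then a lookup of each slash-delimited ancestor prefix of the query path in that set; it trades a scan over paths for a scan over the query's slash positions.
import Mathlib
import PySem

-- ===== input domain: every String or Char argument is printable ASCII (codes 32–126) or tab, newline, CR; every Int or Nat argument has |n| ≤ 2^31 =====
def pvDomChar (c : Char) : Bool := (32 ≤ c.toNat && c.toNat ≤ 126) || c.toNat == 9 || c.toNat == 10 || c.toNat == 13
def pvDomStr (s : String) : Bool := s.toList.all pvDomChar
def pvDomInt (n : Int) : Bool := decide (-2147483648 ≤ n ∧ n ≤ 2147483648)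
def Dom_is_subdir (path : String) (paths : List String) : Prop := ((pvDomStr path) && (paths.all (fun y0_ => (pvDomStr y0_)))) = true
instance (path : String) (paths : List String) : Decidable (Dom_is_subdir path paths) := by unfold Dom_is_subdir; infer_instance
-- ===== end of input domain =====

-- ===== PORT A =====
-- B builds a set of normalized paths once and probes the query's slash-delimited
-- ancestor prefixes against it, instead of a startswith scan over all of paths (objective: alternative).
def isSubdirLoopA (q : List Char) : List String → Bool
  | [] => false
  | x :: rest =>
    let x' := x.toList ++ ['/']
    if x' = q then isSubdirLoopA q rest
    else if PySem.Chars.startswith q x' then true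
    else isSubdirLoopA q rest

def is_subdir (path : String) (paths : List String) : Bool :=
  isSubdirLoopA (path.toList ++ ['/']) paths

-- ===== PORT B =====
def isSubdirLoopB (S : PySem.Set (List Char)) (q : List Char) : List (Int × Char) → Bool
  | [] => false
  | (i, c) :: rest =>
    if c = '/' then
      let pre := PySem.List.slice q none (some (i + 1))
      if pre ≠ q ∧ PySem.Set.contains S pre = true then true
      else isSubdirLoopB S q rest
    else isSubdirLoopB S q rest

def is_subdir_alt (path : String) (paths : List String) : Bool :=
  let S := PySem.Set.ofList (paths.map (fun p => p.toList ++ ['/']))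
  let q := path.toList ++ ['/']
  isSubdirLoopB S q (PySem.List.enumerate q 0)

-- ===== PRECONDITION & SPEC =====
def Spec_is_subdir (path : String) (paths : List String) (out : Bool) : Prop := out = is_subdir_alt path paths
instance (path : String) (paths : List String) (out : Bool) : Decidable (Spec_is_subdir path paths out) := by unfold Spec_is_subdir; infer_instance

-- ===== CLAIM (what is proved, stated in full; the proofs are below) =====
def Claim_equal_is_subdir : Prop := ∀ (path : String) (paths : List String), Dom_is_subdir path paths → Spec_is_subdir path paths (is_subdir path paths)

-- ===== LEMMAS AND PROOFS =====

theorem loopA_eq_any (q : List Char) (l : List String) :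
    isSubdirLoopA q l
      = l.any (fun x => decide (x.toList ++ ['/'] ≠ q) && PySem.Chars.startswith q (x.toList ++ ['/'])) := by
  induction l with
  | nil => rfl
  | cons x rest ih =>
    simp only [isSubdirLoopA, List.any_cons]
    split_ifs <;> simp_all

theorem loopB_eq_any (S : PySem.Set (List Char)) (q : List Char) (es : List (Int × Char)) :
    isSubdirLoopB S q es
      = es.any (fun p => decide (p.2 = '/') &&
          decide (PySem.List.slice q none (some (p.1 + 1)) ≠ q ∧
                  PySem.Set.contains S (PySem.List.slice q none (some (p.1 + 1))) = true)) := by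
  induction es with
  | nil => rfl
  | cons p rest ih =>
    obtain ⟨i, c⟩ := p
    simp only [isSubdirLoopB, List.any_cons]
    split_ifs <;> simp_all

theorem core_iff (q : List Char) (paths : List String) :
    (∃ x ∈ paths, x.toList ++ ['/'] ≠ q ∧ (x.toList ++ ['/']) <+: q)
      ↔ ∃ (k : ℕ) (_ : k < q.length), q[k]'(by omega) = '/' ∧ q.take (k + 1) ≠ q ∧
          ∃ x ∈ paths, x.toList ++ ['/'] = q.take (k + 1) := by
  constructor
  · rintro ⟨x, hx, hne, hpre⟩
    set x' := x.toList ++ ['/'] with hx'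
    have hlen : x'.length ≤ q.length := hpre.length_le
    have hx'len : x'.length = x.toList.length + 1 := by simp [hx']
    have hlt : x'.length < q.length :=
      lt_of_le_of_ne hlen (fun h => hne (hpre.eq_of_length h))
    have htake : x' = q.take x'.length := List.prefix_iff_eq_take.mp hpre
    refine ⟨x.toList.length, by omega, ?_, ?_, x, hx, ?_⟩
    · have h1 : x'[x.toList.length]'(by omega) = '/' := by
        simp [hx']
      have h2 : x'[x.toList.length]'(by omega) = q[x.toList.length]'(by omega) :=
        hpre.getElem (by omega)
      rw [← h2]; exact h1
    · intro hcontra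
      have hlq := congrArg List.length hcontra
      simp only [List.length_take] at hlq
      omega
    · exact hx'len ▸ htake
  · rintro ⟨k, hk, _, hne, x, hx, heq⟩
    refine ⟨x, hx, ?_, ?_⟩
    · rw [heq]; exact hne
    · rw [heq]; exact List.take_prefix _ _

theorem main_eq (path : String) (paths : List String) :
    is_subdir path paths = is_subdir_alt path paths := by
  unfold is_subdir is_subdir_alt
  set q := path.toList ++ ['/'] with hqdef
  rw [Bool.eq_iff_iff, loopA_eq_any, loopB_eq_any]
  simp only [List.any_eq_true, PySem.List.mem_enumerate_iff, Bool.and_eq_true,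
    decide_eq_true_eq, PySem.Chars.startswith_iff, PySem.Set.contains_iff,
    PySem.Set.mem_ofList, List.mem_map]
  rw [core_iff q paths]
  constructor
  · rintro ⟨k, hk, hslash, hne, x, hx, heq⟩
    refine ⟨((0 : Int) + ↑k, q[k]'hk), ⟨k, hk, rfl⟩, hslash, ?_⟩
    have hcast : ((0 : Int) + ↑k + 1) = ((k + 1 : ℕ) : Int) := by push_cast; ring
    dsimp only
    rw [hcast, PySem.List.slice_to_natCast]
    exact ⟨hne, x, hx, heq⟩
  · rintro ⟨p, ⟨k, hk, rfl⟩, hc, hrest⟩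
    dsimp only at hc hrest
    have hcast : ((0 : Int) + ↑k + 1) = ((k + 1 : ℕ) : Int) := by push_cast; ring
    rw [hcast, PySem.List.slice_to_natCast] at hrest
    obtain ⟨hne, x, hx, heq⟩ := hrest
    exact ⟨k, hk, hc, hne, x, hx, heq⟩

-- ===== VERDICT (by name: the statement is the Claim_ definition above) =====
theorem is_subdir_spec : Claim_equal_is_subdir := by
  intro path paths _
  unfold Spec_is_subdir
  exact main_eq path paths
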